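-- pv_equiv track=rewrite | github.com/orionthehunter/social-language-learner | group-shuffle-gpt.py | initial_group_structure
-- ===== SOURCE A (Python) =====
-- def initial_group_structure(num_students):
--     """
--     Given the number of present students, find a grouping into groups of 3 and 4
--     such that 3x + 4y = num_students, with y minimized.
--     Returns a list of group sizes (e.g., [3, 3, 4]).
--     If no valid grouping exists (for n in {1, 2, 4, 5}), returns an empty list.
--     """
--     # Try y from 0 up to the maximum possible number of groups of 4.
--     for y in range(0, num_students // 4 + 1):
--         remaining = num_students - 4 * y
--         if remaining % 3 == 0:
--             x = remaining // 3
--             # Create a list with x groups of 3 and y groups of 4.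
--             sizes = [3] * x + [4] * y
--             return sizes
--     return []
-- ===== SOURCE B (Python) =====
-- def initial_group_structure(num_students):
--     # Closed form: 4 = 3 + 1, so y must be congruent to num_students mod 3;
--     # the minimal non-negative such y is num_students % 3.
--     y = num_students % 3
--     if 4 * y <= num_students:
--         return [3] * ((num_students - 4 * y) // 3) + [4] * y
--     return []
-- ===== Notes on version B (the rewrite author's own statement) =====
-- stated objective: simpler
-- what changed: Replaced the linear search over candidate counts of 4-groups by the closed form y = num_students % 3 (since 4 ≡ 1 mod 3), with a single feasibility guard 4*y <= num_students.
import Mathlib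
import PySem

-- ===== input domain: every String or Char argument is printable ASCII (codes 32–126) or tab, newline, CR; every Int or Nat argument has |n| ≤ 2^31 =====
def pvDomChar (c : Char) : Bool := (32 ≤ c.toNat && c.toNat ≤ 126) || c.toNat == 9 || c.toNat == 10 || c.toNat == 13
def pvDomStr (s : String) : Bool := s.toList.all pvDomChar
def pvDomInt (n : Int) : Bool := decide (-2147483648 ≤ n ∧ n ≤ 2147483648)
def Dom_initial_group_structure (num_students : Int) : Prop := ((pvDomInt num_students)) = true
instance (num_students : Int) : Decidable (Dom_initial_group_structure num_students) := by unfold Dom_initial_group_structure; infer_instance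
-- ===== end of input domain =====

-- B replaces A's search loop over y by the closed form y = n % 3; equal return value on every int.

-- ===== PORT A =====
-- the 'for y in range(...)' loop with early return, as structural recursion over the range list
def pvLoopA (n : Int) : List Int → List Int
  | [] => []
  | y :: ys =>
    let remaining := n - 4 * y
    if PySem.Int.mod remaining 3 = 0 then
      List.replicate (PySem.Int.floordiv remaining 3).toNat 3 ++ List.replicate y.toNat 4
    else pvLoopA n ys

def initial_group_structure (num_students : Int) : List Int :=
  pvLoopA num_students (PySem.List.pyRange 0 (PySem.Int.floordiv num_students 4 + 1) 1)

-- ===== PORT B =====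
def initial_group_structure_alt (num_students : Int) : List Int :=
  let y := PySem.Int.mod num_students 3
  if 4 * y ≤ num_students then
    List.replicate (PySem.Int.floordiv (num_students - 4 * y) 3).toNat 3 ++ List.replicate y.toNat 4
  else []

-- ===== PRECONDITION & SPEC =====
def Spec_initial_group_structure (num_students : Int) (out : List Int) : Prop := out = initial_group_structure_alt num_students
instance (num_students : Int) (out : List Int) : Decidable (Spec_initial_group_structure num_students out) := by unfold Spec_initial_group_structure; infer_instance

-- ===== CLAIM (what is proved, stated in full; the proofs are below) =====
def Claim_equal_initial_group_structure : Prop := ∀ (num_students : Int), Dom_initial_group_structure num_students → Spec_initial_group_structure num_students (initial_group_structure num_students)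

-- ===== LEMMAS AND PROOFS =====

theorem pvAB (n : Int) : initial_group_structure n = initial_group_structure_alt n := by
  unfold initial_group_structure initial_group_structure_alt
  have hm : PySem.Int.mod n 3 = n % 3 := PySem.Int.mod_eq_emod_of_pos (by norm_num)
  have hm4 : PySem.Int.mod (n - 4) 3 = (n - 4) % 3 := PySem.Int.mod_eq_emod_of_pos (by norm_num)
  have hd : PySem.Int.floordiv n 4 = n / 4 := PySem.Int.floordiv_eq_ediv_of_pos (by norm_num)
  have hd4 : PySem.Int.floordiv (n - 4) 3 = (n - 4) / 3 := PySem.Int.floordiv_eq_ediv_of_pos (by norm_num)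
  rw [hd]
  by_cases hn : n < 0
  · rw [PySem.List.pyRange_one_eq_nil (by omega)]
    rw [hm, if_neg (by omega)]
    rfl
  · rw [PySem.List.pyRange_one_cons (by omega)]
    have hr : n % 3 = 0 ∨ n % 3 = 1 ∨ n % 3 = 2 := by omega
    rcases hr with hr | hr | hr
    · simp only [pvLoopA]
      rw [show n - 4 * 0 = n by ring, hm, hr, if_pos rfl, if_pos (by omega : (4:Int) * 0 ≤ n)]
      norm_num
    · simp only [pvLoopA]
      rw [show n - 4 * 0 = n by ring, hm, hr]
      norm_num
      by_cases h4 : 4 ≤ n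
      · rw [PySem.List.pyRange_one_cons (by omega)]
        simp only [pvLoopA]
        rw [show n - 4 * 1 = n - 4 by ring, hm4, if_pos (by omega), if_pos h4, hd4]
        norm_num
      · rw [PySem.List.pyRange_one_eq_nil (by omega)]
        simp only [pvLoopA]
        rw [if_neg h4]
    · simp only [pvLoopA]
      rw [show n - 4 * 0 = n by ring, hm, hr]
      norm_num
      by_cases h4 : 4 ≤ n
      · rw [PySem.List.pyRange_one_cons (by omega)]
        simp only [pvLoopA]
        rw [show n - 4 * 1 = n - 4 by ring, hm4, if_neg (by omega)]
        by_cases h8 : 8 ≤ n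
        · have hm8 : PySem.Int.mod (n - 4 * (1 + 1)) 3 = (n - 8) % 3 := by
            rw [show n - 4 * (1 + 1) = n - 8 by ring]
            exact PySem.Int.mod_eq_emod_of_pos (by norm_num)
          have hd8 : PySem.Int.floordiv (n - 4 * (1 + 1)) 3 = (n - 8) / 3 := by
            rw [show n - 4 * (1 + 1) = n - 8 by ring]
            exact PySem.Int.floordiv_eq_ediv_of_pos (by norm_num)
          rw [PySem.List.pyRange_one_cons (by omega)]
          simp only [pvLoopA]
          rw [hm8, if_pos (by omega), if_pos h8, hd8]
          norm_num
        · rw [PySem.List.pyRange_one_eq_nil (by omega)]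
          simp only [pvLoopA]
          rw [if_neg h8]
      · rw [PySem.List.pyRange_one_eq_nil (by omega)]
        simp only [pvLoopA]
        rw [if_neg (by omega)]

-- ===== VERDICT (by name: the statement is the Claim_ definition above) =====
theorem initial_group_structure_spec : Claim_equal_initial_group_structure := by
  intro n _
  exact pvAB n
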